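-- pv_equiv track=rewrite | github.com/aniervs/programming3-class | aoc/davit/task7-2.py | replace_joker
-- ===== SOURCE A (Python) =====
-- from collections import Counter
-- from functools import cmp_to_key, partial
--
-- def replace_joker(hand):
--     if 'J' not in hand:
--         return hand
--     if hand == 'JJJJJ':
--         return 'AAAAA'
--
--     non_joker_counts = Counter(hand.replace('J', ''))
--     replacement_candidates = [(c, tie_rank_order.index(c), non_joker_counts[c]) for c in hand if c != 'J']
--
--     def compare_candidates(candidate1, candidate2):
--         return (candidate1[2] - candidate2[2]) or (candidate2[1] - candidate1[1])
--
--     sorted_candidates = sorted(replacement_candidates, key=cmp_to_key(compare_candidates))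
--
--     return hand.replace('J', sorted_candidates[-1][0])
--
-- tie_rank_order = 'AKQT98765432J'
-- ===== SOURCE B (Python) =====
-- from collections import Counter
--
-- tie_rank_order = 'AKQT98765432J'
--
-- def replace_joker(hand):
--     if 'J' not in hand:
--         return hand
--     if hand == 'JJJJJ':
--         return 'AAAAA'
--     counts = Counter(hand.replace('J', ''))
--     best = max(counts, key=lambda c: (counts[c], -tie_rank_order.index(c)))
--     return hand.replace('J', best)
-- ===== Notes on version B (the rewrite author's own statement) =====
-- stated objective: simpler
-- what changed: B replaces A's per-occurrence candidate-triple list and cmp_to_key full sort (then last element) by a single max over the Counter's distinct keys with key (count, -rank-index).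
-- outside the precondition, e.g. on replace_joker('J'): A raises IndexError, B raises ValueError; on replace_joker('JJ'): A raises IndexError, B raises ValueError; on replace_joker('Jx'): A raises ValueError, B raises ValueError
import Mathlib
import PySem

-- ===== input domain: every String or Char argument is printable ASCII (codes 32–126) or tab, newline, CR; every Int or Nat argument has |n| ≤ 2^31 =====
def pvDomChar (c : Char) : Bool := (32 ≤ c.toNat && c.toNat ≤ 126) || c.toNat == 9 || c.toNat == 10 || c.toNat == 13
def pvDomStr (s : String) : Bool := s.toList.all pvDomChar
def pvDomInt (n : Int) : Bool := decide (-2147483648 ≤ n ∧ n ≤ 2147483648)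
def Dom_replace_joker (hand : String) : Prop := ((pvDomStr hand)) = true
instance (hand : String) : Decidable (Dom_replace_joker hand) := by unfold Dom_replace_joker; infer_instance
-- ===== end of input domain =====

-- B drops A's per-occurrence candidate list and cmp_to_key sort: it picks the best replacement
-- directly with max over the Counter's distinct keys (objective: simpler).


-- shared module-level constant tie_rank_order
def tieRank : List Char := "AKQT98765432J".toList

-- tie_rank_order.index(c); Python raises ValueError when c is absent — those inputs are
-- excluded by Pre_, so the port defaults to 0 there.
def idxOfRank (c : Char) : Int := ((PySem.List.index? tieRank c).getD 0 : Nat)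

-- ===== PORT A =====
-- compare_candidates(c1, c2) = (c1[2] - c2[2]) or (c2[1] - c1[1])
def cmpCand (c1 c2 : Char × Int × Int) : Int :=
  if c1.2.2 - c2.2.2 ≠ 0 then c1.2.2 - c2.2.2 else c2.2.1 - c1.2.1

def insCmp (x : Char × Int × Int) : List (Char × Int × Int) → List (Char × Int × Int)
  | [] => [x]
  | y :: ys => if cmpCand x y < 0 then x :: y :: ys else y :: insCmp x ys

-- sorted(candidates, key=cmp_to_key(compare_candidates)): a stable comparator sort. Exact:
-- the comparator is a total preorder under which equal-comparing candidates are identical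
-- triples, so every stable sort (CPython's timsort and this insertion sort) gives the same list.
def sortCmp (l : List (Char × Int × Int)) : List (Char × Int × Int) :=
  l.foldl (fun acc x => insCmp x acc) []

def replace_joker (hand : String) : String :=
  if PySem.Str.isIn "J" hand = false then hand
  else if hand = "JJJJJ" then "AAAAA"
  else
    let nonJokerCounts := PySem.Dict.counter (PySem.Str.replace hand "J" "").toList
    let candidates := (hand.toList.filter (fun c => c ≠ 'J')).map
      (fun c => (c, idxOfRank c, nonJokerCounts.getD c 0))
    match (sortCmp candidates).getLast? with
    | some t => PySem.Str.replace hand "J" (String.ofList [t.1])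
    | none => hand   -- Python raises IndexError here (no non-joker card); excluded by Pre_

-- ===== PORT B =====
def replace_joker_alt (hand : String) : String :=
  if PySem.Str.isIn "J" hand = false then hand
  else if hand = "JJJJJ" then "AAAAA"
  else
    let counts := PySem.Dict.counter (PySem.Str.replace hand "J" "").toList
    match PySem.List.max2? counts.keys (fun c => counts.getD c 0) (fun c => -(idxOfRank c)) with
    | some b => PySem.Str.replace hand "J" (String.ofList [b])
    | none => hand   -- Python max() raises ValueError on an empty Counter; excluded by Pre_

-- ===== PRECONDITION & SPEC =====
-- Pre_ excludes exactly the inputs where A raises: hands containing 'J' (other than 'JJJJJ')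
-- that have no non-joker card (IndexError) or a non-joker card outside the 13 card symbols
-- (ValueError from tie_rank_order.index).
def Pre_replace_joker (hand : String) : Prop :=
  ('J' ∈ hand.toList ∧ hand ≠ "JJJJJ") →
    (hand.toList.any (fun c => c != 'J') = true
     ∧ hand.toList.all (fun c => c == 'J' || tieRank.contains c) = true)
instance (hand : String) : Decidable (Pre_replace_joker hand) := by
  unfold Pre_replace_joker; infer_instance

def pvWitness_replace_joker : String := "T55J5"

def Spec_replace_joker (hand : String) (out : String) : Prop := out = replace_joker_alt hand
instance (hand : String) (out : String) : Decidable (Spec_replace_joker hand out) := by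
  unfold Spec_replace_joker; infer_instance

-- ===== CLAIM (what is proved, stated in full; the proofs are below) =====
def Claim_equal_replace_joker : Prop := ∀ (hand : String), Dom_replace_joker hand → Pre_replace_joker hand → Spec_replace_joker hand (replace_joker hand)

-- ===== LEMMAS AND PROOFS =====

-- hand.replace('J', '') keeps exactly the non-'J' characters
theorem replace_go_filter (fuel : Nat) (l acc : List Char) (h : l.length ≤ fuel) :
    PySem.Chars.replace.go ['J'] [] fuel l acc = acc.reverse ++ l.filter (fun c => c ≠ 'J') := by
  induction fuel generalizing l acc with
  | zero =>
    have hl : l = [] := List.eq_nil_of_length_eq_zero (Nat.le_zero.mp h)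
    subst hl
    simp [PySem.Chars.replace.go]
  | succ n ih =>
    cases l with
    | nil => simp [PySem.Chars.replace.go]
    | cons c t =>
      by_cases hc : c = 'J'
      · subst hc
        rw [show PySem.Chars.replace.go ['J'] [] (n+1) ('J' :: t) acc
              = PySem.Chars.replace.go ['J'] [] n t acc from by
            simp [PySem.Chars.replace.go, List.isPrefixOf]]
        rw [ih t acc (by simpa using h)]
        simp
      · rw [show PySem.Chars.replace.go ['J'] [] (n+1) (c :: t) acc
              = PySem.Chars.replace.go ['J'] [] n t (c :: acc) from by
            simp [PySem.Chars.replace.go, List.isPrefixOf, (Ne.symm hc : 'J' ≠ c)]]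
        rw [ih t (c :: acc) (by simpa using h)]
        simp [hc]

theorem replace_J_filter (s : List Char) :
    PySem.Chars.replace s ['J'] [] = s.filter (fun c => c ≠ 'J') := by
  rw [show PySem.Chars.replace s ['J'] [] = PySem.Chars.replace.go ['J'] [] s.length s [] from rfl]
  simpa using replace_go_filter s.length s [] le_rfl

theorem mem_insCmp (x y : Char × Int × Int) (l : List (Char × Int × Int)) :
    y ∈ insCmp x l ↔ y = x ∨ y ∈ l := by
  induction l with
  | nil => simp [insCmp]
  | cons a t ih =>
    simp only [insCmp]
    split
    · simp
    · simp [ih]; tauto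

theorem cmpCand_trans {a b c : Char × Int × Int} (h1 : cmpCand a b < 0) (h2 : cmpCand b c < 0) :
    cmpCand a c < 0 := by
  simp only [cmpCand] at *; split_ifs at * <;> omega

theorem cmpCand_asymm {a b : Char × Int × Int} (h : cmpCand a b < 0) : ¬ cmpCand b a < 0 := by
  simp only [cmpCand] at *; split_ifs at * <;> omega

theorem cmpCand_irrefl (a : Char × Int × Int) : ¬ cmpCand a a < 0 := by
  simp only [cmpCand]; split_ifs <;> omega

theorem pairwise_insCmp (x : Char × Int × Int) (l : List (Char × Int × Int))
    (h : l.Pairwise (fun t u => ¬ cmpCand u t < 0)) :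
    (insCmp x l).Pairwise (fun t u => ¬ cmpCand u t < 0) := by
  induction l with
  | nil => simp [insCmp]
  | cons a t ih =>
    rcases List.pairwise_cons.mp h with ⟨ha, ht⟩
    simp only [insCmp]
    split
    · rename_i hlt
      refine List.pairwise_cons.mpr ⟨?_, h⟩
      intro z hz
      rcases List.mem_cons.mp hz with rfl | hz
      · exact cmpCand_asymm hlt
      · intro hzx
        exact (ha z hz) (cmpCand_trans hzx hlt)
    · rename_i hnlt
      refine List.pairwise_cons.mpr ⟨?_, ih ht⟩
      intro z hz
      rcases (mem_insCmp x z t).mp hz with rfl | hz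
      · exact hnlt
      · exact ha z hz

theorem sortCmp_aux (l acc : List (Char × Int × Int))
    (hacc : acc.Pairwise (fun t u => ¬ cmpCand u t < 0)) :
    (l.foldl (fun acc x => insCmp x acc) acc).Pairwise (fun t u => ¬ cmpCand u t < 0)
    ∧ ∀ y, y ∈ l.foldl (fun acc x => insCmp x acc) acc ↔ y ∈ l ∨ y ∈ acc := by
  induction l generalizing acc with
  | nil => simpa using hacc
  | cons a t ih =>
    rcases ih (insCmp a acc) (pairwise_insCmp a acc hacc) with ⟨hp, hm⟩
    refine ⟨hp, ?_⟩
    intro y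
    rw [List.foldl_cons, hm y, mem_insCmp]
    simp; tauto

theorem sortCmp_pairwise (l : List (Char × Int × Int)) :
    (sortCmp l).Pairwise (fun t u => ¬ cmpCand u t < 0) :=
  (sortCmp_aux l [] (by simp)).1

theorem mem_sortCmp (l : List (Char × Int × Int)) (y : Char × Int × Int) :
    y ∈ sortCmp l ↔ y ∈ l := by
  have := (sortCmp_aux l [] (by simp)).2 y
  simpa [sortCmp] using this

-- the last element of a Pairwise-R list is R-above every member
theorem getLast_pairwise {α : Type} {R : α → α → Prop} (l : List α) (h : l.Pairwise R)
    (hne : l ≠ []) (y : α) (hy : y ∈ l) : y = l.getLast hne ∨ R y (l.getLast hne) := by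
  induction l with
  | nil => simp at hy
  | cons a t ih =>
    rcases List.pairwise_cons.mp h with ⟨ha, ht⟩
    cases t with
    | nil =>
      simp at hy
      exact Or.inl (by simp [hy, List.getLast])
    | cons b u =>
      rw [List.getLast_cons (by simp)]
      rcases List.mem_cons.mp hy with rfl | hy
      · exact Or.inr (ha _ (List.getLast_mem _))
      · exact ih ht (by simp) hy

-- the foldl inside PySem.List.max2?, named so we can induct on it
def m2go {α : Type} (k1 k2 : α → Int) (acc : Option α) (xs : List α) : Option α :=
  xs.foldl
    (fun acc x =>
      match acc with
      | none => some x
      | some m =>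
        if (decide (k1 m < k1 x) || !decide (k1 x < k1 m) && decide (k2 m < k2 x)) = true
        then some x else some m)
    acc

theorem max2?_eq_m2go {α : Type} (xs : List α) (k1 k2 : α → Int) :
    PySem.List.max2? xs k1 k2 = m2go k1 k2 none xs := rfl

theorem m2go_some {α : Type} (k1 k2 : α → Int) (l : List α) (m : α) :
    ∃ r, m2go k1 k2 (some m) l = some r ∧ (r = m ∨ r ∈ l)
      ∧ (k1 m < k1 r ∨ (k1 m = k1 r ∧ k2 m ≤ k2 r))
      ∧ ∀ y ∈ l, k1 y < k1 r ∨ (k1 y = k1 r ∧ k2 y ≤ k2 r) := by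
  induction l generalizing m with
  | nil => exact ⟨m, rfl, Or.inl rfl, Or.inr ⟨rfl, le_rfl⟩, by simp⟩
  | cons x t ih =>
    by_cases hc : k1 m < k1 x ∨ (k1 m ≤ k1 x ∧ k2 m < k2 x)
    · rcases ih x with ⟨r, hr, hmem, hP, hall⟩
      have hstep : m2go k1 k2 (some m) (x :: t) = m2go k1 k2 (some x) t := by
        simp [m2go, hc]
      refine ⟨r, hstep ▸ hr, ?_, by omega, ?_⟩
      · rcases hmem with rfl | hr' <;> simp_all
      · intro y hy
        rcases List.mem_cons.mp hy with rfl | hy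
        · exact hP
        · exact hall y hy
    · rcases ih m with ⟨r, hr, hmem, hP, hall⟩
      have hstep : m2go k1 k2 (some m) (x :: t) = m2go k1 k2 (some m) t := by
        simp [m2go, hc]
      refine ⟨r, hstep ▸ hr, ?_, hP, ?_⟩
      · rcases hmem with rfl | hr' <;> simp_all
      · intro y hy
        rcases List.mem_cons.mp hy with rfl | hy
        · omega
        · exact hall y hy

theorem max2?_spec {α : Type} (xs : List α) (k1 k2 : α → Int) (x : α) (t : List α)
    (hxs : xs = x :: t) :
    ∃ r, PySem.List.max2? xs k1 k2 = some r ∧ r ∈ xs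
      ∧ ∀ y ∈ xs, k1 y < k1 r ∨ (k1 y = k1 r ∧ k2 y ≤ k2 r) := by
  subst hxs
  rcases m2go_some k1 k2 t x with ⟨r, hr, hmem, hP, hall⟩
  refine ⟨r, ?_, ?_, ?_⟩
  · rw [max2?_eq_m2go]
    simpa [m2go] using hr
  · rcases hmem with rfl | h
    · exact List.mem_cons_self
    · exact List.mem_cons_of_mem _ h
  · intro y hy
    rcases List.mem_cons.mp hy with rfl | hy
    · exact hP
    · exact hall y hy

-- tieRank index is injective on members of tieRank
theorem idxOfRank_inj {a b : Char} (ha : a ∈ tieRank) (hb : b ∈ tieRank)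
    (h : idxOfRank a = idxOfRank b) : a = b := by
  rcases (PySem.List.index?_isSome_iff (xs := tieRank) (v := a)).mpr ha |> Option.isSome_iff_exists.mp
    with ⟨ka, hka⟩
  rcases (PySem.List.index?_isSome_iff (xs := tieRank) (v := b)).mpr hb |> Option.isSome_iff_exists.mp
    with ⟨kb, hkb⟩
  have hik : ka = kb := by
    simp only [idxOfRank, hka, hkb, Option.getD_some] at h
    exact_mod_cast h
  rcases PySem.List.getElem_of_index?_eq_some hka with ⟨hlt, hga, -⟩
  rcases PySem.List.getElem_of_index?_eq_some hkb with ⟨hlt', hgb, -⟩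
  subst hik
  rw [← hga, ← hgb]

-- ===== VERDICT (by name: the statement is the Claim_ definition above) =====
theorem replace_joker_spec : Claim_equal_replace_joker := by
  intro hand _ hpre
  unfold Spec_replace_joker replace_joker replace_joker_alt
  by_cases hin : PySem.Str.isIn "J" hand = false
  · rw [if_pos hin, if_pos hin]
  · rw [if_neg hin, if_neg hin]
    have hJ : PySem.Str.isIn "J" hand = true := by
      cases h : PySem.Str.isIn "J" hand
      · exact absurd h hin
      · rfl
    by_cases h5 : hand = "JJJJJ"
    · rw [if_pos h5, if_pos h5]
    · rw [if_neg h5, if_neg h5]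
      simp only []
      have hJmem : 'J' ∈ hand.toList :=
        (List.singleton_infix_iff 'J' hand.toList).mp
          ((PySem.Str.isIn_iff_infix "J" hand).mp hJ)
      rcases hpre ⟨hJmem, h5⟩ with ⟨hex, hall0⟩
      obtain ⟨c0, hc0mem, hc0ne'⟩ := List.any_eq_true.mp hex
      have hc0ne : c0 ≠ 'J' := by simpa using hc0ne'
      have hall : ∀ c ∈ hand.toList, c ≠ 'J' → c ∈ tieRank := by
        intro c hc hne
        have h := List.all_eq_true.mp hall0 c hc
        simpa [hne] using h
      set ns := hand.toList.filter (fun c => c ≠ 'J') with hns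
      have hrep : (PySem.Str.replace hand "J" "").toList = ns := by
        rw [show (PySem.Str.replace hand "J" "").toList
              = PySem.Chars.replace hand.toList "J".toList "".toList from by
            simp [pysem]]
        rw [show ("J" : String).toList = ['J'] from rfl,
            show ("" : String).toList = [] from rfl]
        exact replace_J_filter _
      have hc0ns : c0 ∈ ns := by
        rw [hns, List.mem_filter]
        exact ⟨hc0mem, by simpa using hc0ne⟩
      have hsub : ∀ c ∈ ns, c ∈ tieRank := by
        intro c hc
        rw [hns, List.mem_filter] at hc
        exact hall c hc.1 (by simpa using hc.2)
      have hcnt : ∀ c, (PySem.Dict.counter (PySem.Str.replace hand "J" "").toList).getD c 0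
          = (ns.count c : Int) := by
        intro c; rw [hrep]; exact PySem.Dict.getD_counter ns c
      have hkeys : (PySem.Dict.counter (PySem.Str.replace hand "J" "").toList).keys
          = PySem.Set.ofList ns := by
        rw [hrep]; exact PySem.Dict.keys_counter ns
      -- A side: the last of the comparator-sorted candidate list
      set F : Char → Char × Int × Int :=
        fun c => (c, idxOfRank c,
          (PySem.Dict.counter (PySem.Str.replace hand "J" "").toList).getD c 0) with hF
      set cands := ns.map F with hcands
      have hcne : cands ≠ [] := by
        rw [hcands]
        exact List.ne_nil_of_mem (List.mem_map_of_mem (f := F) hc0ns)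
      have hsne : sortCmp cands ≠ [] := by
        intro hnil
        rcases List.exists_mem_of_ne_nil cands hcne with ⟨z, hz⟩
        have := (mem_sortCmp cands z).mpr hz
        simp [hnil] at this
      set tA := (sortCmp cands).getLast hsne with htA
      have hlast : (sortCmp cands).getLast? = some tA :=
        List.getLast?_eq_some_getLast hsne
      have htAmem : tA ∈ cands := (mem_sortCmp cands tA).mp (List.getLast_mem hsne)
      rcases List.mem_map.mp htAmem with ⟨cA, hcAns, hcAeq⟩
      have hAmax : ∀ u ∈ cands, ¬ cmpCand tA u < 0 := by
        intro u hu
        rcases getLast_pairwise (sortCmp cands) (sortCmp_pairwise cands) hsne u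
            ((mem_sortCmp cands u).mpr hu) with rfl | hR
        · exact cmpCand_irrefl _
        · exact hR
      -- B side: the max2? over the counter keys
      have hkne : (PySem.Dict.counter (PySem.Str.replace hand "J" "").toList).keys ≠ [] := by
        rw [hkeys]
        exact List.ne_nil_of_mem ((PySem.Set.mem_ofList ns c0).mpr hc0ns)
      rcases List.exists_cons_of_ne_nil hkne with ⟨x, t, hxt⟩
      rcases max2?_spec _
          (fun c => (PySem.Dict.counter (PySem.Str.replace hand "J" "").toList).getD c 0)
          (fun c => -(idxOfRank c)) x t hxt with ⟨cB, hmax, hcBmem, hBmax⟩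
      rw [hlast, hmax]
      -- the two chosen characters coincide
      have hcBns : cB ∈ ns := by
        rw [hkeys] at hcBmem
        exact (PySem.Set.mem_ofList ns cB).mp hcBmem
      have hA' := hAmax (F cB) (List.mem_map_of_mem (f := F) hcBns)
      have hB' := hBmax cA (by
        rw [hkeys]; exact (PySem.Set.mem_ofList ns cA).mpr hcAns)
      rw [← hcAeq] at hA'
      simp only [hF, cmpCand, hcnt] at hA' hB'
      have heq : cA = cB := by
        apply idxOfRank_inj (hsub cA hcAns) (hsub cB hcBns)
        by_cases hcc : (ns.count cA : Int) = (ns.count cB : Int)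
        · simp only [hcc] at hA'
          split_ifs at hA' with hgo
          · omega
          · rcases hB' with h | ⟨-, h⟩ <;> omega
        · split_ifs at hA' with hgo
          · rcases hB' with h | ⟨h, -⟩ <;> omega
          · omega
      rw [← hcAeq]
      simp only [hF]
      rw [heq]
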